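-- pv_equiv track=rewrite | github.com/sheepdain/SSAFY | algorithm/SWEA/5203.py | check
-- ===== SOURCE A (Python) =====
-- def check(lst):
--     lst.sort()
--     i, j = 1, 1
--     for k in range(1, len(lst)):
--         if lst[k] == lst[k - 1]:
--             i += 1
--             if i == 3:
--                 return 1
--         else:
--             i = 1
--             if lst[k] == lst[k - 1] + 1:
--                 j += 1
--                 if j == 3:
--                     return 1
--             else:
--                 j = 1
--     return 0
-- ===== SOURCE B (Python) =====
-- def check(lst):
--     lst.sort()
--     if any(a == c for a, c in zip(lst, lst[2:])):
--         return 1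
--     d = []
--     for x in lst:
--         if not d or d[-1] != x:
--             d.append(x)
--     if any(c == a + 2 for a, c in zip(d, d[2:])):
--         return 1
--     return 0
-- ===== Notes on version B (the rewrite author's own statement) =====
-- stated objective: alternative
-- what changed: A's single stateful scan with two running counters (equal-run length i and consecutive-run length j) is replaced by sort plus two stateless gap-2 window scans: lst[k]==lst[k-2] on the sorted list detects a triple, and d[k]==d[k-2]+2 on the adjacent-deduplicated list detects three consecutive values.
import Mathlib
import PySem

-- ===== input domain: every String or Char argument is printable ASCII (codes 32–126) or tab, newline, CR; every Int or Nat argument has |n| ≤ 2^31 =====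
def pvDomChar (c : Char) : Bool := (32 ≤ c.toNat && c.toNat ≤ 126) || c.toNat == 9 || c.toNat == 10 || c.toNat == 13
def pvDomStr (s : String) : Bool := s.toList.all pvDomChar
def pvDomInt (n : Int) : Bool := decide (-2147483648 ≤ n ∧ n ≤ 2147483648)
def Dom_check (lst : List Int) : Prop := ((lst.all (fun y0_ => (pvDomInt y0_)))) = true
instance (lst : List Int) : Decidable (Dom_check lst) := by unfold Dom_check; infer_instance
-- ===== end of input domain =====

-- B replaces A's single stateful counter loop by sort + a gap-2 window scan + adjacent dedupe + a second window scan (alternative decomposition, same cost).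
-- Both A and B sort lst in place (the same mutation); the equivalence proved here is about the return value.

-- ===== PORT A =====
-- A's for-loop over k=1..len-1 with early return, as structural recursion over the sorted tail;
-- state = (prev = lst[k-1], i, j), just as in the Python.
def checkLoop (prev i j : Int) : List Int → Int
  | [] => 0
  | x :: rest =>
    if x = prev then
      (if i + 1 = 3 then 1 else checkLoop x (i + 1) j rest)
    else
      if x = prev + 1 then
        (if j + 1 = 3 then 1 else checkLoop x 1 (j + 1) rest)
      else checkLoop x 1 1 rest

def check (lst : List Int) : Int :=
  match PySem.List.sorted lst (fun x => x) false with
  | [] => 0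
  | h :: t => checkLoop h 1 1 t

-- ===== PORT B =====
def check_alt (lst : List Int) : Int :=
  let s := PySem.List.sorted lst (fun x => x) false
  if (s.zip (s.drop 2)).any (fun q => q.1 == q.2) then 1
  else
    let d := s.foldl (fun d x => if d = [] ∨ d.getLast? ≠ some x then d ++ [x] else d) []
    if (d.zip (d.drop 2)).any (fun q => q.2 == q.1 + 2) then 1 else 0

-- ===== PRECONDITION & SPEC =====
def Spec_check (lst : List Int) (out : Int) : Prop := out = check_alt lst
instance (lst : List Int) (out : Int) : Decidable (Spec_check lst out) := by unfold Spec_check; infer_instance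

-- ===== CLAIM (what is proved, stated in full; the proofs are below) =====
def Claim_equal_check : Prop := ∀ (lst : List Int), Dom_check lst → Spec_check lst (check lst)


-- ===== LEMMAS AND PROOFS =====

-- A's equal-run counter, isolated
def eqB (prev i : Int) : List Int → Bool
  | [] => false
  | x :: r => if x = prev then (if i + 1 = 3 then true else eqB x (i + 1) r) else eqB x 1 r

-- A's sequence counter, isolated
def seqB (prev j : Int) : List Int → Bool
  | [] => false
  | x :: r =>
    if x = prev then seqB prev j r
    else if x = prev + 1 then (if j + 1 = 3 then true else seqB x (j + 1) r)
    else seqB x 1 r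

-- sliding window of width 3
def win2 (p : Int → Int → Bool) : List Int → Bool
  | a :: b :: c :: r => p a c || win2 p (b :: c :: r)
  | _ => false

-- adjacent dedupe of the tail, given the previous kept element
def dtail (prev : Int) : List Int → List Int
  | [] => []
  | x :: r => if x = prev then dtail prev r else x :: dtail x r

theorem eqB_cons (prev i x : Int) (r : List Int) :
    eqB prev i (x :: r) = if x = prev then (if i + 1 = 3 then true else eqB x (i + 1) r) else eqB x 1 r := rfl
theorem seqB_cons (prev j x : Int) (r : List Int) :
    seqB prev j (x :: r) = if x = prev then seqB prev j r
      else if x = prev + 1 then (if j + 1 = 3 then true else seqB x (j + 1) r) else seqB x 1 r := rfl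
theorem win2_cons3 (p : Int → Int → Bool) (a b c : Int) (r : List Int) :
    win2 p (a :: b :: c :: r) = (p a c || win2 p (b :: c :: r)) := rfl

theorem checkLoop_split (rest : List Int) : ∀ (prev i j : Int),
    checkLoop prev i j rest = if (eqB prev i rest || seqB prev j rest) then 1 else 0 := by
  induction rest with
  | nil => intro prev i j; simp [checkLoop, eqB, seqB]
  | cons x r ih =>
    intro prev i j
    by_cases hx : x = prev
    · subst hx
      by_cases hi : i + 1 = 3 <;> simp [checkLoop, eqB_cons, seqB_cons, hi, ih]
    · by_cases hs : x = prev + 1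
      · by_cases hj : j + 1 = 3 <;> simp [checkLoop, eqB_cons, seqB_cons, hx, hs, hj, ih]
      · simp [checkLoop, eqB_cons, seqB_cons, hx, hs, ih]

theorem zip_drop2_win2 (p : Int → Int → Bool) (l : List Int) :
    (l.zip (l.drop 2)).any (fun q => p q.1 q.2) = win2 p l := by
  induction l with
  | nil => simp [win2]
  | cons a t ih =>
    match t with
    | [] => simp [win2]
    | [b] => simp [win2]
    | b :: c :: r =>
      simp only [List.drop, List.zip_cons_cons, List.any_cons] at *
      simp [win2_cons3, ih]

theorem zip_eq_win2 (l : List Int) :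
    (l.zip (l.drop 2)).any (fun q => q.1 == q.2) = win2 (fun a c => a == c) l :=
  zip_drop2_win2 (fun a c => a == c) l

theorem zip_seq_win2 (l : List Int) :
    (l.zip (l.drop 2)).any (fun q => q.2 == q.1 + 2) = win2 (fun a c => c == a + 2) l :=
  zip_drop2_win2 (fun a c => c == a + 2) l

theorem eqB_win2 (t : List Int) : ∀ prev : Int, List.IsChain (· ≤ ·) (prev :: t) →
    (eqB prev 1 t = win2 (fun a c => a == c) (prev :: t) ∧
     eqB prev 2 t = (decide (t.head? = some prev) || win2 (fun a c => a == c) (prev :: t))) := by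
  induction t with
  | nil => intro prev _; simp [eqB, win2]
  | cons x r ih =>
    intro prev hch
    have h1 : prev ≤ x := (List.isChain_cons_cons.mp hch).1
    have hch2 : List.IsChain (· ≤ ·) (x :: r) := (List.isChain_cons_cons.mp hch).2
    have ihx := ih x hch2
    by_cases hx : x = prev
    · subst hx
      refine ⟨?_, ?_⟩
      · rw [eqB_cons, if_pos rfl, if_neg (by omega), show (1:Int)+1 = 2 by norm_num, ihx.2]
        match r with
        | [] => simp [win2]
        | y :: r' =>
          rw [win2_cons3]
          simp only [List.head?, Option.some.injEq]
          congr 1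
          rw [Bool.beq_eq_decide_eq, decide_eq_decide]
          exact eq_comm
      · rw [eqB_cons, if_pos rfl, if_pos (by omega)]
        simp
    · refine ⟨?_, ?_⟩ <;> rw [eqB_cons, if_neg hx, ihx.1]
      · match r with
        | [] => simp [win2, hx]
        | y :: r' =>
          have hxy : x ≤ y := (List.isChain_cons_cons.mp hch2).1
          have hpy : ¬ (prev = y) := by omega
          rw [win2_cons3 _ prev x y r']
          simp [hpy]
      · match r with
        | [] => simp [win2, hx]
        | y :: r' =>
          have hxy : x ≤ y := (List.isChain_cons_cons.mp hch2).1
          have hpy : ¬ (prev = y) := by omega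
          rw [win2_cons3 _ prev x y r']
          simp [hpy, hx]

theorem seqB_dtail (rest : List Int) : ∀ (prev j : Int),
    seqB prev j rest = seqB prev j (dtail prev rest) := by
  induction rest with
  | nil => intro prev j; simp [dtail]
  | cons x r ih =>
    intro prev j
    by_cases hx : x = prev
    · subst hx; simp [seqB_cons, dtail, ih]
    · by_cases hs : x = prev + 1
      · by_cases hj : j + 1 = 3 <;> simp [seqB_cons, dtail, hx, hs, hj, ih]
      · simp [seqB_cons, dtail, hx, hs, ih]

theorem seqB_win2 (t : List Int) : ∀ prev : Int, List.IsChain (· < ·) (prev :: t) →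
    (seqB prev 1 t = win2 (fun a c => c == a + 2) (prev :: t) ∧
     seqB prev 2 t = (decide (t.head? = some (prev + 1)) || win2 (fun a c => c == a + 2) (prev :: t))) := by
  induction t with
  | nil => intro prev _; simp [seqB, win2]
  | cons x r ih =>
    intro prev hch
    have h1 : prev < x := (List.isChain_cons_cons.mp hch).1
    have hch2 : List.IsChain (· < ·) (x :: r) := (List.isChain_cons_cons.mp hch).2
    have ihx := ih x hch2
    have hx : ¬ (x = prev) := by omega
    by_cases hs : x = prev + 1
    · refine ⟨?_, ?_⟩
      · rw [seqB_cons, if_neg hx, if_pos hs, if_neg (by omega), show (1:Int)+1 = 2 by norm_num, ihx.2]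
        match r with
        | [] => simp [win2, List.head?]
        | y :: r' =>
          rw [win2_cons3]
          simp only [List.head?, Option.some.injEq]
          congr 1
          rw [Bool.beq_eq_decide_eq, decide_eq_decide]
          omega
      · rw [seqB_cons, if_neg hx, if_pos hs, if_pos (by omega)]
        simp [List.head?, hs]
    · have hge : prev + 2 ≤ x := by omega
      refine ⟨?_, ?_⟩ <;> rw [seqB_cons, if_neg hx, if_neg hs, ihx.1]
      · match r with
        | [] => simp [win2]
        | y :: r' =>
          have hxy : x < y := (List.isChain_cons_cons.mp hch2).1
          have hpy : ¬ (y = prev + 2) := by omega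
          rw [win2_cons3 _ prev x y r']
          simp [hpy]
      · match r with
        | [] => simp [win2, List.head?, hs]
        | y :: r' =>
          have hxy : x < y := (List.isChain_cons_cons.mp hch2).1
          have hpy : ¬ (y = prev + 2) := by omega
          rw [win2_cons3 _ prev x y r']
          simp [List.head?, hpy, hs]

theorem dtail_chain (t : List Int) : ∀ prev : Int, List.IsChain (· ≤ ·) (prev :: t) →
    List.IsChain (· < ·) (prev :: dtail prev t) := by
  induction t with
  | nil => intro prev _; simp [dtail]
  | cons x r ih =>
    intro prev hch
    have h1 : prev ≤ x := (List.isChain_cons_cons.mp hch).1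
    have hch2 : List.IsChain (· ≤ ·) (x :: r) := (List.isChain_cons_cons.mp hch).2
    by_cases hx : x = prev
    · subst hx
      simpa [dtail] using ih x hch2
    · have hlt : prev < x := lt_of_le_of_ne h1 (fun h => hx h.symm)
      have hd := ih x hch2
      rw [show dtail prev (x :: r) = x :: dtail x r by simp [dtail, hx]]
      exact List.isChain_cons_cons.mpr ⟨hlt, hd⟩

-- B's foldl dedupe equals head-cons of dtail
theorem foldl_dedup_aux (t : List Int) : ∀ (acc : List Int) (p : Int),
    acc ≠ [] → acc.getLast? = some p →
    t.foldl (fun d x => if d = [] ∨ d.getLast? ≠ some x then d ++ [x] else d) acc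
      = acc ++ dtail p t := by
  induction t with
  | nil => intro acc p _ _; simp [dtail]
  | cons x r ih =>
    intro acc p hne hlast
    by_cases hx : x = p
    · subst hx
      have hcond : ¬ (acc = [] ∨ acc.getLast? ≠ some x) := by
        push_neg; exact ⟨hne, hlast⟩
      simp only [List.foldl_cons, if_neg hcond]
      rw [ih acc x hne hlast]
      simp [dtail]
    · have hcond : (acc = [] ∨ acc.getLast? ≠ some x) := by
        right; rw [hlast]; simp; exact fun h => hx h.symm
      simp only [List.foldl_cons, if_pos hcond]
      rw [ih (acc ++ [x]) x (by simp) (by simp)]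
      simp [dtail, hx]

theorem foldl_dedup (h : Int) (t : List Int) :
    (h :: t).foldl (fun d x => if d = [] ∨ d.getLast? ≠ some x then d ++ [x] else d) []
      = h :: dtail h t := by
  simp only [List.foldl_cons]
  rw [if_pos (Or.inl trivial)]
  simpa using foldl_dedup_aux t [h] h (by simp) (by simp)

-- ===== VERDICT (by name: the statement is the Claim_ definition above) =====
theorem check_spec : Claim_equal_check := by
  intro lst _
  unfold Spec_check check check_alt
  have hpw : (PySem.List.sorted lst (fun x => x) false).Pairwise (· ≤ ·) := by
    simpa using PySem.List.sorted_pairwise lst (fun x => x)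
  match hs : PySem.List.sorted lst (fun x => x) false with
  | [] => simp [win2]
  | h :: t =>
    rw [hs] at hpw
    have hch : List.IsChain (· ≤ ·) (h :: t) := List.isChain_iff_pairwise.mpr hpw
    have hchd : List.IsChain (· < ·) (h :: dtail h t) := dtail_chain t h hch
    show checkLoop h 1 1 t = _
    rw [checkLoop_split]
    dsimp only
    rw [zip_eq_win2, zip_seq_win2, foldl_dedup,
        (eqB_win2 t h hch).1, seqB_dtail,
        (seqB_win2 (dtail h t) h hchd).1]
    rcases Bool.eq_false_or_eq_true (win2 (fun a c => a == c) (h :: t)) with h1 | h1 <;>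
      rcases Bool.eq_false_or_eq_true (win2 (fun a c => c == a + 2) (h :: dtail h t)) with h2 | h2 <;>
      simp [h1, h2]
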